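-- pv_equiv track=rewrite | github.com/MeherajUlMahmmud/doc-gen | doc-gen-backend/base/middleware.py | _get_cache_control_for_path
-- ===== SOURCE A (Python) =====
-- def _get_cache_control_for_path(path: str, status_code: int) -> str:
--     """
--     Determine the appropriate Cache-Control header based on the request path and status code.
--     """
--     path = path.lower()
--
--     # Don't cache error responses
--     if status_code >= 400:
--         return 'no-cache, no-store, must-revalidate'
--
--     # API endpoints - different cache strategies
--     if path.startswith('/api/'):
--         if any(pattern in path for pattern in ['/auth/', '/login/', '/logout/']):
--             return 'no-cache, no-store, must-revalidate'
--         elif any(pattern in path for pattern in ['/user/', '/profile/', '/dashboard/']):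
--             return 'private, max-age=300'  # 5 minutes for user-specific data
--         else:
--             return 'public, max-age=3600'  # 1 hour for public API data
--
--     # Admin and portal areas - no cache
--     if any(pattern in path for pattern in ['/admin/', '/portal/']):
--         return 'no-cache, no-store, must-revalidate'
--
--     # Static files are handled by WhiteNoise
--     if path.startswith('/static/'):
--         return None  # Let WhiteNoise handle it
--
--     # Media files - cache for 1 month
--     if path.startswith('/media/'):
--         return 'public, max-age=2592000'
--
--     # Public pages - cache for 1 hour
--     if path in ['/', '/about/', '/services/', '/contact/', '/quote/']:
--         return 'public, max-age=3600'
--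
--     # Default for other pages - cache for 15 minutes
--     return 'public, max-age=900'
-- ===== SOURCE B (Python) =====
-- # Tokenization rewrite: split the lowered path once on '/' and decide from the
-- # token list (anchored first segment + set of interior segments) instead of
-- # scanning the string repeatedly for substrings.
-- def _get_cache_control_for_path(path: str, status_code: int) -> str:
--     NO_STORE = 'no-cache, no-store, must-revalidate'
--     if status_code >= 400:
--         return NO_STORE
--     p = path.lower()
--     parts = p.split('/')
--     inner = set(parts[1:-1])          # segments with a '/' on both sides
--     anchored = len(parts) > 2 and parts[0] == ''   # p starts '/<seg>/...'
--     if anchored and parts[1] == 'api':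
--         if inner & {'auth', 'login', 'logout'}:
--             return NO_STORE
--         if inner & {'user', 'profile', 'dashboard'}:
--             return 'private, max-age=300'
--         return 'public, max-age=3600'
--     if inner & {'admin', 'portal'}:
--         return NO_STORE
--     if anchored and parts[1] == 'static':
--         return None
--     if anchored and parts[1] == 'media':
--         return 'public, max-age=2592000'
--     if p in {'/', '/about/', '/services/', '/contact/', '/quote/'}:
--         return 'public, max-age=3600'
--     return 'public, max-age=900'
-- ===== Notes on version B (the rewrite author's own statement) =====
-- stated objective: alternative
-- what changed: B tokenizes the lowered path once with split('/') and answers every routing question from the token list (anchored first segment, set of interior segments) instead of A's repeated substring/startswith scans of the raw string; proved equal via a characterisation of '/seg/' occurrences as interior split segments.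
import Mathlib
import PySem

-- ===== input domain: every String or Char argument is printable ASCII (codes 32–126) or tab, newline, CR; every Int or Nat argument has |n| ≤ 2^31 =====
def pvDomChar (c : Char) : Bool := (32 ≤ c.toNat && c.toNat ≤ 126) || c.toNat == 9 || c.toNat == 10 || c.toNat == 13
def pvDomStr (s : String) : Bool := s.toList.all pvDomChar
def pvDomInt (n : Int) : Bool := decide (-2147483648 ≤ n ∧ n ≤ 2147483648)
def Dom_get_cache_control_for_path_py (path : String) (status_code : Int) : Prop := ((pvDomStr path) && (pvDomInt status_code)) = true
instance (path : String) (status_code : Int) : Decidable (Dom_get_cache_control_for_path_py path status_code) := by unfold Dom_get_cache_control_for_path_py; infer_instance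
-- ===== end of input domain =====

-- B re-derives every routing test from one split of the lowered path into '/'-separated
-- segments (anchored first segment + interior-segment set) instead of A's repeated
-- substring/prefix scans of the string; same return values everywhere.

-- ===== PORT A =====
-- Literal transliteration of A's if/elif chain of substring and prefix tests.
def get_cache_control_for_path_py (path : String) (status_code : Int) : Option String :=
  let path := PySem.Str.lower path
  if status_code ≥ 400 then some "no-cache, no-store, must-revalidate"
  else if PySem.Str.startswith path "/api/" then
    if ["/auth/", "/login/", "/logout/"].any (fun pat => PySem.Str.isIn pat path) then
      some "no-cache, no-store, must-revalidate"
    else if ["/user/", "/profile/", "/dashboard/"].any (fun pat => PySem.Str.isIn pat path) then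
      some "private, max-age=300"
    else some "public, max-age=3600"
  else if ["/admin/", "/portal/"].any (fun pat => PySem.Str.isIn pat path) then
    some "no-cache, no-store, must-revalidate"
  else if PySem.Str.startswith path "/static/" then none
  else if PySem.Str.startswith path "/media/" then some "public, max-age=2592000"
  else if ["/", "/about/", "/services/", "/contact/", "/quote/"].contains path then
    some "public, max-age=3600"
  else some "public, max-age=900"

-- ===== PORT B =====
-- Transliteration of Source B: split the lowered path once on '/', then decide from the
-- token list.  `p.split('/')` is ported as Mathlib's `List.splitOn '/'` on the char
-- list (the corresponding Lean function: keeps empty pieces, Python-exact for a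
-- one-char separator); `parts[1:-1]` is `(parts.drop 1).dropLast`; the Python set
-- intersections become membership scans of the interior-segment set.
def pvNoStore : String := "no-cache, no-store, must-revalidate"

def get_cache_control_for_path_py_alt (path : String) (status_code : Int) : Option String :=
  if status_code ≥ 400 then some pvNoStore
  else
    let p := PySem.Str.lower path
    let parts := p.toList.splitOn '/'
    let inner := PySem.Set.ofList ((parts.drop 1).dropLast)
    let anchored := decide (2 < parts.length) && (parts[0]? == some [])
    if anchored && (parts[1]? == some "api".toList) then
      if inner.any (fun t => ["auth".toList, "login".toList, "logout".toList].contains t) then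
        some pvNoStore
      else if inner.any (fun t => ["user".toList, "profile".toList, "dashboard".toList].contains t) then
        some "private, max-age=300"
      else some "public, max-age=3600"
    else if inner.any (fun t => ["admin".toList, "portal".toList].contains t) then some pvNoStore
    else if anchored && (parts[1]? == some "static".toList) then none
    else if anchored && (parts[1]? == some "media".toList) then some "public, max-age=2592000"
    else if ["/", "/about/", "/services/", "/contact/", "/quote/"].contains p then
      some "public, max-age=3600"
    else some "public, max-age=900"

-- ===== PRECONDITION & SPEC =====
def Spec_get_cache_control_for_path_py (path : String) (status_code : Int) (out : Option String) : Prop := out = get_cache_control_for_path_py_alt path status_code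
instance (path : String) (status_code : Int) (out : Option String) : Decidable (Spec_get_cache_control_for_path_py path status_code out) := by unfold Spec_get_cache_control_for_path_py; infer_instance

-- ===== CLAIM (what is proved, stated in full; the proofs are below) =====
def Claim_equal_get_cache_control_for_path_py : Prop := ∀ (path : String) (status_code : Int), Dom_get_cache_control_for_path_py path status_code → Spec_get_cache_control_for_path_py path status_code (get_cache_control_for_path_py path status_code)

-- ===== LEMMAS AND PROOFS =====

-- glue is the inverse of splitOn '/': it rebuilds the char list from the segment list.
def pvGlue : List (List Char) → List Char
  | [] => []
  | [a] => a
  | a :: b :: t => a ++ '/' :: pvGlue (b :: t)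

theorem pvGlue_cons_cons (a : List Char) (b : List Char) (t : List (List Char)) :
    pvGlue ((a) :: b :: t) = a ++ '/' :: pvGlue (b :: t) := rfl

theorem pvGlue_head_cons (c : Char) (h : List Char) (t : List (List Char)) :
    pvGlue ((c :: h) :: t) = c :: pvGlue (h :: t) := by
  cases t with
  | nil => rfl
  | cons b t => rfl

theorem pvGlue_splitOn (cs : List Char) : pvGlue (cs.splitOn '/') = cs := by
  induction cs with
  | nil => rfl
  | cons c cs ih =>
    simp only [List.splitOn] at *
    rw [List.splitOnP_cons]
    by_cases hc : c = '/'
    · subst hc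
      rw [if_pos (show (('/' : Char) == '/') = true from rfl)]
      obtain ⟨b, t, hbt⟩ := List.exists_cons_of_ne_nil (List.splitOnP_ne_nil (· == '/') cs)
      rw [hbt] at ih ⊢
      rw [pvGlue_cons_cons, List.nil_append, ih]
    · rw [if_neg (by simpa using hc)]
      obtain ⟨b, t, hbt⟩ := List.exists_cons_of_ne_nil (List.splitOnP_ne_nil (· == '/') cs)
      rw [hbt] at ih ⊢
      rw [List.modifyHead_cons, pvGlue_head_cons, ih]

theorem pv_not_slash_mem_splitOn (cs : List Char) : ∀ l ∈ cs.splitOn '/', '/' ∉ l := by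
  induction cs with
  | nil => intro l hl; simp only [List.splitOn, List.splitOnP_nil] at hl; simp at hl; simp [hl]
  | cons c cs ih =>
    intro l hl
    simp only [List.splitOn] at *
    rw [List.splitOnP_cons] at hl
    by_cases hc : c = '/'
    · subst hc
      rw [if_pos (show (('/' : Char) == '/') = true from rfl)] at hl
      rcases List.mem_cons.mp hl with h | h
      · simp [h]
      · exact ih l h
    · rw [if_neg (by simpa using hc)] at hl
      obtain ⟨b, t, hbt⟩ := List.exists_cons_of_ne_nil (List.splitOnP_ne_nil (· == '/') cs)
      rw [hbt, List.modifyHead_cons] at hl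
      rcases List.mem_cons.mp hl with h | h
      · subst h
        intro hm
        rcases List.mem_cons.mp hm with h' | h'
        · exact hc h'.symm
        · exact ih b (hbt ▸ List.mem_cons_self) h'
      · exact ih l (hbt ▸ List.mem_cons_of_mem b h)

-- a pattern beginning with '/' cannot sit inside a slash-free list
theorem pv_no_infix_of_slash_free (u b : List Char) (hb : '/' ∉ b) :
    ¬ ('/' :: u) <:+: b := by
  intro h
  exact hb (h.sublist.mem List.mem_cons_self)

-- skipping a slash-free block on the left of an infix search
theorem pv_infix_append (u a v : List Char) (ha : '/' ∉ a) :
    ('/' :: u) <:+: (a ++ v) ↔ ('/' :: u) <:+: v := by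
  induction a with
  | nil => simp
  | cons c a ih =>
    have hc : c ≠ '/' := fun h => ha (h ▸ List.mem_cons_self)
    have ha' : '/' ∉ a := fun h => ha (List.mem_cons_of_mem c h)
    rw [List.cons_append, List.infix_cons_iff]
    constructor
    · rintro (h | h)
      · exact absurd (List.cons_prefix_cons.mp h).1.symm hc
      · exact (ih ha').mp h
    · intro h
      exact Or.inr ((ih ha').mpr h)

-- matching "w/" against "b/..." for slash-free w, b forces w = b
theorem pv_prefix_slash (w b r : List Char) (hw : '/' ∉ w) (hb : '/' ∉ b) :
    ((w ++ ['/']) <+: (b ++ '/' :: r)) ↔ w = b := by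
  induction w generalizing b with
  | nil =>
    cases b with
    | nil => simp
    | cons c b =>
      have hc : c ≠ '/' := fun h => hb (h ▸ List.mem_cons_self)
      simp only [List.nil_append, List.cons_append, List.cons_prefix_cons]
      constructor
      · rintro ⟨h, -⟩; exact absurd h.symm hc
      · intro h; exact absurd h (by simp)
  | cons x w ih =>
    cases b with
    | nil =>
      have hx : x ≠ '/' := fun h => hw (h ▸ List.mem_cons_self)
      simp only [List.cons_append, List.nil_append, List.cons_prefix_cons]
      constructor
      · rintro ⟨h, -⟩; exact absurd h hx
      · intro h; exact absurd h (by simp)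
    | cons y b =>
      have hw' : '/' ∉ w := fun h => hw (List.mem_cons_of_mem x h)
      have hb' : '/' ∉ b := fun h => hb (List.mem_cons_of_mem y h)
      simp only [List.cons_append, List.cons_prefix_cons]
      rw [ih b hw' hb']
      constructor
      · rintro ⟨h1, h2⟩; rw [h1, h2]
      · intro h; exact ⟨(List.cons_eq_cons.mp h).1, (List.cons_eq_cons.mp h).2⟩

-- occurrences of "/w/" in '/' :: glue P are exactly the non-last segments of P
theorem pv_infix_slash_glue (w : List Char) (hw : '/' ∉ w) :
    ∀ P : List (List Char), P ≠ [] → (∀ l ∈ P, '/' ∉ l) →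
      (('/' :: (w ++ ['/'])) <:+: ('/' :: pvGlue P) ↔ w ∈ P.dropLast) := by
  intro P
  induction P with
  | nil => intro h; exact absurd rfl h
  | cons b Q ih =>
    intro _ hsf
    have hb : '/' ∉ b := hsf b List.mem_cons_self
    cases Q with
    | nil =>
      simp only [List.dropLast_singleton]
      constructor
      · intro h
        rcases List.infix_cons_iff.mp h with h | h
        · rcases List.cons_prefix_cons.mp h with ⟨-, h2⟩
          have : '/' ∈ b := (h2.sublist).mem (by simp)
          exact absurd this hb
        · exact absurd h (pv_no_infix_of_slash_free _ _ hb)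
      · intro h; exact absurd h (by simp)
    | cons q Q' =>
      have hQ : ∀ l ∈ q :: Q', '/' ∉ l := fun l hl => hsf l (List.mem_cons_of_mem b hl)
      rw [pvGlue_cons_cons]
      constructor
      · intro h
        rcases List.infix_cons_iff.mp h with h | h
        · rcases List.cons_prefix_cons.mp h with ⟨-, h2⟩
          have : w = b := (pv_prefix_slash w b (pvGlue (q :: Q')) hw hb).mp h2
          rw [List.dropLast_cons_of_ne_nil (by simp)]
          exact List.mem_cons.mpr (Or.inl this)
        · have h' : ('/' :: (w ++ ['/'])) <:+: ('/' :: pvGlue (q :: Q')) :=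
            (pv_infix_append _ b _ hb).mp h
          have := (ih (by simp) hQ).mp h'
          rw [List.dropLast_cons_of_ne_nil (by simp)]
          exact List.mem_cons.mpr (Or.inr this)
      · intro h
        rw [List.dropLast_cons_of_ne_nil (by simp)] at h
        rcases List.mem_cons.mp h with h | h
        · subst h
          refine List.infix_cons_iff.mpr (Or.inl ?_)
          rw [List.cons_prefix_cons]
          exact ⟨rfl, (pv_prefix_slash w w (pvGlue (q :: Q')) hw hw).mpr rfl⟩
        · refine List.infix_cons_iff.mpr (Or.inr ?_)
          exact (pv_infix_append _ b _ hb).mpr ((ih (by simp) hQ).mpr h)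

-- the interior-membership characterisation of A's substring test, stated on splitOn
theorem pv_isIn_iff_inner (w : List Char) (hw : '/' ∉ w) (cs : List Char) :
    (('/' :: (w ++ ['/'])) <:+: cs ↔ w ∈ ((cs.splitOn '/').drop 1).dropLast) := by
  obtain ⟨a, P, hP⟩ := List.exists_cons_of_ne_nil
    (show cs.splitOn '/' ≠ [] from List.splitOnP_ne_nil _ _)
  have hglue : pvGlue (a :: P) = cs := hP ▸ pvGlue_splitOn cs
  have hsf : ∀ l ∈ a :: P, '/' ∉ l := hP ▸ pv_not_slash_mem_splitOn cs
  have ha : '/' ∉ a := hsf a List.mem_cons_self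
  rw [hP, List.drop_one, List.tail_cons, ← hglue]
  cases P with
  | nil =>
    simp only [List.dropLast_nil]
    constructor
    · intro h; exact absurd h (pv_no_infix_of_slash_free _ _ ha)
    · intro h; exact absurd h (by simp)
  | cons b Q =>
    rw [pvGlue_cons_cons, pv_infix_append _ a _ ha]
    exact pv_infix_slash_glue w hw (b :: Q) (by simp)
      (fun l hl => hsf l (List.mem_cons_of_mem a hl))

-- the anchored-segment characterisation of A's startswith test, stated on splitOn
theorem pv_startswith_iff_anchor (w : List Char) (hw : '/' ∉ w) (cs : List Char) :
    (('/' :: (w ++ ['/'])) <+: cs ↔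
      2 < (cs.splitOn '/').length ∧ (cs.splitOn '/')[0]? = some [] ∧
        (cs.splitOn '/')[1]? = some w) := by
  obtain ⟨a, P, hP⟩ := List.exists_cons_of_ne_nil
    (show cs.splitOn '/' ≠ [] from List.splitOnP_ne_nil _ _)
  have hglue : pvGlue (a :: P) = cs := hP ▸ pvGlue_splitOn cs
  have hsf : ∀ l ∈ a :: P, '/' ∉ l := hP ▸ pv_not_slash_mem_splitOn cs
  have ha : '/' ∉ a := hsf a List.mem_cons_self
  rw [hP, ← hglue]
  cases a with
  | cons c a' =>
    have hc : c ≠ '/' := fun h => ha (h ▸ List.mem_cons_self)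
    rw [pvGlue_head_cons]
    constructor
    · intro h; exact absurd (List.cons_prefix_cons.mp h).1.symm hc
    · rintro ⟨-, h0, -⟩; simp at h0
  | nil =>
    cases P with
    | nil =>
      simp only [pvGlue]
      constructor
      · intro h; exact absurd h (by simp)
      · rintro ⟨h, -⟩; simp at h
    | cons b Q =>
      have hb : '/' ∉ b := hsf b (List.mem_cons_of_mem _ List.mem_cons_self)
      rw [pvGlue_cons_cons, List.nil_append, List.cons_prefix_cons]
      cases Q with
      | nil =>
        simp only [pvGlue]
        constructor
        · rintro ⟨-, h2⟩
          have : '/' ∈ b := h2.sublist.mem (by simp)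
          exact absurd this hb
        · rintro ⟨h, -⟩; simp at h
      | cons q Q' =>
        rw [pvGlue_cons_cons]
        rw [pv_prefix_slash w b (pvGlue (q :: Q')) hw hb]
        constructor
        · rintro ⟨-, h⟩
          refine ⟨by simp only [List.length_cons]; omega, rfl, by simp [h]⟩
        · rintro ⟨-, -, h1⟩
          simp only [List.getElem?_cons_succ, List.getElem?_cons_zero, Option.some.injEq] at h1
          exact ⟨rfl, h1.symm⟩

-- booleans of the two ports agree, test by test
theorem pv_any_isIn_eq (pats : List (List Char)) (hpats : ∀ w ∈ pats, '/' ∉ w) (cs : List Char) :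
    (pats.any fun w => PySem.Chars.isIn ('/' :: (w ++ ['/'])) cs) =
      ((PySem.Set.ofList (((cs.splitOn '/').drop 1).dropLast)).any fun t => pats.contains t) := by
  rw [Bool.eq_iff_iff]
  simp only [List.any_eq_true, PySem.Chars.isIn_iff_infix, List.contains_eq_mem,
    PySem.Set.mem_ofList, decide_eq_true_eq]
  constructor
  · rintro ⟨w, hwmem, hinf⟩
    exact ⟨w, (pv_isIn_iff_inner w (hpats w hwmem) cs).mp hinf, hwmem⟩
  · rintro ⟨t, htmem, htpat⟩
    exact ⟨t, htpat, (pv_isIn_iff_inner t (hpats t htpat) cs).mpr htmem⟩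

theorem pv_startswith_eq (w : List Char) (hw : '/' ∉ w) (cs : List Char) :
    PySem.Chars.startswith cs ('/' :: (w ++ ['/'])) =
      (decide (2 < (cs.splitOn '/').length) && ((cs.splitOn '/')[0]? == some []) &&
        ((cs.splitOn '/')[1]? == some w)) := by
  rw [Bool.eq_iff_iff]
  simp only [PySem.Chars.startswith_iff, Bool.and_eq_true, decide_eq_true_eq, beq_iff_eq]
  rw [pv_startswith_iff_anchor w hw cs]
  tauto

-- ===== VERDICT (by name: the statement is the Claim_ definition above) =====
theorem get_cache_control_for_path_py_spec : Claim_equal_get_cache_control_for_path_py := by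
  intro path status_code _
  unfold Spec_get_cache_control_for_path_py
  unfold get_cache_control_for_path_py get_cache_control_for_path_py_alt
  by_cases hs : status_code ≥ 400
  · simp [hs, pvNoStore]
  · simp only [if_neg hs]
    set q := PySem.Str.lower path with hq
    have e_api := pv_startswith_eq "api".toList (by decide) q.toList
    have e_static := pv_startswith_eq "static".toList (by decide) q.toList
    have e_media := pv_startswith_eq "media".toList (by decide) q.toList
    have e_auth := pv_any_isIn_eq ["auth".toList, "login".toList, "logout".toList] (by decide) q.toList
    have e_user := pv_any_isIn_eq ["user".toList, "profile".toList, "dashboard".toList] (by decide) q.toList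
    have e_admin := pv_any_isIn_eq ["admin".toList, "portal".toList] (by decide) q.toList
    simp only [List.any_cons, List.any_nil, Bool.or_false] at e_auth e_user e_admin
    simp only [PySem.Str.startswith_eq, PySem.Str.isIn_eq, List.any_cons, List.any_nil,
      Bool.or_false, pvNoStore]
    simp only [show ("/api/" : String).toList = '/' :: ("api".toList ++ ['/']) from rfl,
        show ("/static/" : String).toList = '/' :: ("static".toList ++ ['/']) from rfl,
        show ("/media/" : String).toList = '/' :: ("media".toList ++ ['/']) from rfl,
        show ("/auth/" : String).toList = '/' :: ("auth".toList ++ ['/']) from rfl,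
        show ("/login/" : String).toList = '/' :: ("login".toList ++ ['/']) from rfl,
        show ("/logout/" : String).toList = '/' :: ("logout".toList ++ ['/']) from rfl,
        show ("/user/" : String).toList = '/' :: ("user".toList ++ ['/']) from rfl,
        show ("/profile/" : String).toList = '/' :: ("profile".toList ++ ['/']) from rfl,
        show ("/dashboard/" : String).toList = '/' :: ("dashboard".toList ++ ['/']) from rfl,
        show ("/admin/" : String).toList = '/' :: ("admin".toList ++ ['/']) from rfl,
        show ("/portal/" : String).toList = '/' :: ("portal".toList ++ ['/']) from rfl,
        e_api, e_static, e_media, e_auth, e_user, e_admin]
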